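-- pv_equiv track=rewrite | github.com/t-hashimoto249/bbc1 | bbc1/common/bbclib.py | is_less_than
-- ===== SOURCE A (Python) =====
-- def is_less_than(val_a, val_b):
--     """
--     return True if val_a is less than val_b (evaluate as integer)
--     :param val_a:
--     :param val_b:
--     :return:
--     """
--     size = len(val_a)
--     if size != len(val_b):
--         return False
--     for i in reversed(range(size)):
--         if val_a[i] < val_b[i]:
--             return True
--         elif val_a[i] > val_b[i]:
--             return False
--     return False
-- ===== SOURCE B (Python) =====
-- def is_less_than(val_a, val_b):
--     if len(val_a) != len(val_b):
--         return False
--     diffs = [(a, b) for a, b in zip(val_a, val_b) if a != b]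
--     return bool(diffs) and diffs[-1][0] < diffs[-1][1]
-- ===== Notes on version B (the rewrite author's own statement) =====
-- stated objective: alternative
-- what changed: Instead of scanning indices most-significant-first with early returns, B filters the zipped pairs to the positions where the lists differ in a single forward pass and decides by the last differing pair alone.
import Mathlib
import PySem

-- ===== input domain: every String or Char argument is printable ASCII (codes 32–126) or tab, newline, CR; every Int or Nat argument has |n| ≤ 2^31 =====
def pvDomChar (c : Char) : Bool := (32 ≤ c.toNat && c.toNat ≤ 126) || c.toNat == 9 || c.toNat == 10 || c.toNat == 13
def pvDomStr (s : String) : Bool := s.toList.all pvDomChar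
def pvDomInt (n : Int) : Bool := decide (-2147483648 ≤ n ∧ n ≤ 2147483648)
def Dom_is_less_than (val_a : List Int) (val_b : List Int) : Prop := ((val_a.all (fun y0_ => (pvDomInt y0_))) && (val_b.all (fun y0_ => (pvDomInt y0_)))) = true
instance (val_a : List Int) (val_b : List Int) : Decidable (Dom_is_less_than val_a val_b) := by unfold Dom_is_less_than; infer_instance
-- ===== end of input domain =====

-- B replaces A's most-significant-first index scan with early returns by a
-- forward filter of the zipped pairs to the differing positions, deciding by the
-- last differing pair alone (objective: alternative).

-- ===== PORT A =====
-- the 'for i in reversed(range(size))' loop with its early returns; indices drawn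
-- from range(size) are always in bounds, so the pyGetD default 0 is never used
def is_less_than_loop (va vb : List Int) : List Int → Bool
  | [] => false
  | i :: rest =>
    if PySem.List.pyGetD va i 0 < PySem.List.pyGetD vb i 0 then true
    else if PySem.List.pyGetD va i 0 > PySem.List.pyGetD vb i 0 then false
    else is_less_than_loop va vb rest

def is_less_than (val_a : List Int) (val_b : List Int) : Bool :=
  let size := PySem.List.len val_a
  if size ≠ PySem.List.len val_b then false
  else is_less_than_loop val_a val_b (PySem.List.pyRange 0 size 1).reverse

-- ===== PORT B =====
-- diffs = [(a, b) for a, b in zip(val_a, val_b) if a != b];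
-- return bool(diffs) and diffs[-1][0] < diffs[-1][1]
def is_less_than_alt (val_a : List Int) (val_b : List Int) : Bool :=
  if PySem.List.len val_a ≠ PySem.List.len val_b then false
  else
    let diffs := (val_a.zip val_b).filter (fun p => p.1 != p.2)
    match diffs.getLast? with
    | none => false
    | some p => decide (p.1 < p.2)

-- ===== PRECONDITION & SPEC =====
def Spec_is_less_than (val_a : List Int) (val_b : List Int) (out : Bool) : Prop := out = is_less_than_alt val_a val_b
instance (val_a : List Int) (val_b : List Int) (out : Bool) : Decidable (Spec_is_less_than val_a val_b out) := by unfold Spec_is_less_than; infer_instance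

-- ===== CLAIM (what is proved, stated in full; the proofs are below) =====
def Claim_equal_is_less_than : Prop := ∀ (val_a : List Int) (val_b : List Int), Dom_is_less_than val_a val_b → Spec_is_less_than val_a val_b (is_less_than val_a val_b)

-- ===== LEMMAS AND PROOFS =====

-- pairwise most-significant-first comparison on already-reversed lists (proof
-- intermediary between A's index loop and B's filter)
def revCmp : List Int → List Int → Bool
  | [], [] => false
  | [], _ :: _ => true
  | _ :: _, [] => false
  | a :: as, b :: bs => if a < b then true else if b < a then false else revCmp as bs

-- appending one element at the end does not change the loop while all remaining
-- indices lie inside the original lists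
lemma is_less_than_loop_append (xs ys : List Int) (a b : Int) (h : ys.length = xs.length) :
    ∀ idxs : List Int, (∀ i ∈ idxs, 0 ≤ i ∧ i < (xs.length : Int)) →
      is_less_than_loop (xs ++ [a]) (ys ++ [b]) idxs = is_less_than_loop xs ys idxs := by
  intro idxs
  induction idxs with
  | nil => intro _; rfl
  | cons i rest ih =>
    intro hmem
    obtain ⟨h0, hlt⟩ := hmem i (List.mem_cons_self ..)
    have hx : PySem.List.pyGetD (xs ++ [a]) i 0 = PySem.List.pyGetD xs i 0 := by
      rw [PySem.List.pyGetD_eq_getElem _ 0 h0 (by simp; omega),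
          PySem.List.pyGetD_eq_getElem _ 0 h0 (by simpa using hlt)]
      exact List.getElem_append_left (by omega)
    have hy : PySem.List.pyGetD (ys ++ [b]) i 0 = PySem.List.pyGetD ys i 0 := by
      rw [PySem.List.pyGetD_eq_getElem _ 0 h0 (by simp [h]; omega),
          PySem.List.pyGetD_eq_getElem _ 0 h0 (by omega)]
      exact List.getElem_append_left (by omega)
    simp only [is_less_than_loop, hx, hy]
    split_ifs <;> first
      | rfl
      | exact ih (fun j hj => hmem j (List.mem_cons_of_mem _ hj))

lemma is_less_than_loop_eq_revCmp :
    ∀ (as bs : List Int), as.length = bs.length →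
      is_less_than_loop as.reverse bs.reverse
        ((PySem.List.pyRange 0 (as.length : Int) 1).reverse) = revCmp as bs := by
  intro as
  induction as with
  | nil =>
    intro bs hb
    have : bs = [] := List.eq_nil_of_length_eq_zero hb.symm
    subst this
    simp [is_less_than_loop, revCmp]
  | cons a as ih =>
    intro bs hb
    match bs, hb with
    | b :: bs, hb =>
      have hlen : as.length = bs.length := by simpa using hb
      have hrange : PySem.List.pyRange 0 ((as.length + 1 : Nat) : Int) 1
          = PySem.List.pyRange 0 (as.length : Int) 1 ++ [(as.length : Int)] := by
        have := PySem.List.pyRange_one_succ_right (a := 0) (b := (as.length : Int)) (by omega)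
        simpa [Int.add_comm] using this
      have hxa : PySem.List.pyGetD (as.reverse ++ [a]) ((as.length : Int)) 0 = a := by
        rw [PySem.List.pyGetD_natCast]
        simp
      have hxb : PySem.List.pyGetD (bs.reverse ++ [b]) ((as.length : Int)) 0 = b := by
        rw [PySem.List.pyGetD_natCast]
        simp [hlen]
      simp only [List.length_cons, List.reverse_cons, revCmp]
      rw [hrange]
      simp only [List.reverse_append, List.reverse_singleton, List.singleton_append,
        is_less_than_loop, hxa, hxb]
      have hshrink : is_less_than_loop (as.reverse ++ [a]) (bs.reverse ++ [b])
          ((PySem.List.pyRange 0 (as.length : Int) 1).reverse)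
          = is_less_than_loop as.reverse bs.reverse
              ((PySem.List.pyRange 0 (as.length : Int) 1).reverse) := by
        apply is_less_than_loop_append _ _ _ _ (by simp [hlen])
        intro i hi
        rw [List.mem_reverse, PySem.List.mem_pyRange_one] at hi
        simp only [List.length_reverse]
        omega
      rw [hshrink, ih bs hlen]

-- revCmp on equal-length lists is decided by the FIRST differing pair
lemma revCmp_eq_head_filter :
    ∀ (as bs : List Int), as.length = bs.length →
      revCmp as bs
        = (match ((as.zip bs).filter (fun p => p.1 != p.2)).head? with
           | none => false
           | some p => decide (p.1 < p.2)) := by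
  intro as
  induction as with
  | nil =>
    intro bs hb
    have : bs = [] := List.eq_nil_of_length_eq_zero hb.symm
    subst this; rfl
  | cons a as ih =>
    intro bs hb
    match bs, hb with
    | b :: bs, hb =>
      have hlen : as.length = bs.length := by simpa using hb
      by_cases hab : a = b
      · subst hab
        simpa [revCmp, List.zip_cons_cons, List.filter] using ih bs hlen
      · rcases lt_or_gt_of_ne hab with h | h
        · simp [revCmp, List.zip_cons_cons, hab, h]
        · simp [revCmp, List.zip_cons_cons, hab, h, not_lt_of_gt h]

-- the last differing pair of (va, vb) is the first differing pair of the reversed lists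
lemma getLast_filter_zip (va vb : List Int) (h : va.length = vb.length) :
    ((va.zip vb).filter (fun p => p.1 != p.2)).getLast?
      = ((va.reverse.zip vb.reverse).filter (fun p => p.1 != p.2)).head? := by
  rw [← List.head?_reverse, ← List.filter_reverse]
  congr 2
  simp [List.zip, List.reverse_zipWith h]

-- ===== VERDICT (by name: the statement is the Claim_ definition above) =====
theorem is_less_than_spec : Claim_equal_is_less_than := by
  intro va vb _
  unfold Spec_is_less_than is_less_than is_less_than_alt
  simp only [PySem.List.len_eq]
  by_cases h : (va.length : Int) = vb.length
  · have hlen : va.length = vb.length := by omega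
    have h1 := is_less_than_loop_eq_revCmp va.reverse vb.reverse (by simp [hlen])
    simp only [List.reverse_reverse, List.length_reverse] at h1
    have h2 := revCmp_eq_head_filter va.reverse vb.reverse (by simp [hlen])
    simp only [h, ite_not, if_true]
    rw [← h, h1, h2, getLast_filter_zip va vb hlen]
  · simp [h]
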